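-- pv_equiv track=rewrite | github.com/vKochanov78/SoftUni-Python-Advanced-OOP | Python Advanced OOP/Advanced/8. Modules/Lecture/modules.py | draw_triangle
-- ===== SOURCE A (Python) =====
-- def draw_triangle(number: int):
--     triangle = ""
--
--     # The first part of the art.
--     for i in range(1, number + 1):
--         for j in range(1, i + 1):
--             triangle += f"{j}"
--         triangle += "\n"
--
--     # The second part of the art
--     for i in range(number, 0, -1):
--         for j in range(1, i):
--             triangle += f"{j}"
--         triangle += "\n"
--
--     return triangle
-- ===== SOURCE B (Python) =====
-- def draw_triangle(number: int):
--     digits = [str(j) for j in range(1, number + 1)]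
--     rows = [''.join(digits[:i]) for i in range(1, number + 1)]
--     rows += [''.join(digits[:i - 1]) for i in range(number, 0, -1)]
--     return ''.join(row + '\n' for row in rows)
-- ===== Notes on version B (the rewrite author's own statement) =====
-- stated objective: alternative
-- what changed: B precomputes str(j) once into a table and builds every row as a joined prefix slice of that table, then joins all rows at the end, instead of A's nested loops that re-format each number and append it character-group by character-group to one growing string.
import Mathlib
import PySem

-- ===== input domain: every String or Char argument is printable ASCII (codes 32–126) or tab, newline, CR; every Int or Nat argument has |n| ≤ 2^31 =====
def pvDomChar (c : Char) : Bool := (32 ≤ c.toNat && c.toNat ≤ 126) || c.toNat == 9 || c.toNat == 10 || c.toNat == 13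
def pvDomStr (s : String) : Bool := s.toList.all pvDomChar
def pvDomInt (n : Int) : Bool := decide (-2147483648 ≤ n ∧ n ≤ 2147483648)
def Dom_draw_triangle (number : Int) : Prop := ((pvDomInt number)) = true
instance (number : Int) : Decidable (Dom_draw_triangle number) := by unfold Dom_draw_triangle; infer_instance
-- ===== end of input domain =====

-- B precomputes the str(j) table once and builds rows as joined prefix slices joined in bulk; same return value as A.
-- ===== PORT A =====
-- literal port of A: two nested for-loops appending f"{j}" and "\n" to one accumulator (built as List Char, wrapped at the end)
def draw_triangle (number : Int) : String :=
  let t1 : List Char :=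
    (PySem.List.pyRange 1 (number + 1) 1).foldl
      (fun acc i =>
        ((PySem.List.pyRange 1 (i + 1) 1).foldl (fun a j => a ++ PySem.Int.toChars j) acc) ++ ['\n'])
      ([] : List Char)
  let t2 : List Char :=
    (PySem.List.pyRange number 0 (-1)).foldl
      (fun acc i =>
        ((PySem.List.pyRange 1 i 1).foldl (fun a j => a ++ PySem.Int.toChars j) acc) ++ ['\n'])
      t1
  String.ofList t2

-- ===== PORT B =====
-- literal port of Source B: digits table, rows as prefix slices, one final join
def draw_triangle_alt (number : Int) : String :=
  let digits : List (List Char) := (PySem.List.pyRange 1 (number + 1) 1).map PySem.Int.toChars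
  let rows1 : List (List Char) :=
    (PySem.List.pyRange 1 (number + 1) 1).map (fun i => (PySem.List.slice digits none (some i)).flatten)
  let rows2 : List (List Char) :=
    (PySem.List.pyRange number 0 (-1)).map (fun i => (PySem.List.slice digits none (some (i - 1))).flatten)
  String.ofList (((rows1 ++ rows2).map (fun row => row ++ ['\n'])).flatten)

-- ===== PRECONDITION & SPEC =====
def Spec_draw_triangle (number : Int) (out : String) : Prop := out = draw_triangle_alt number
instance (number : Int) (out : String) : Decidable (Spec_draw_triangle number out) := by unfold Spec_draw_triangle; infer_instance

-- ===== CLAIM (what is proved, stated in full; the proofs are below) =====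
def Claim_equal_draw_triangle : Prop := ∀ (number : Int), Dom_draw_triangle number → Spec_draw_triangle number (draw_triangle number)

-- ===== LEMMAS AND PROOFS =====

-- ===== VERDICT (by name: the statement is the Claim_ definition above) =====
lemma take_pyRange_one (m i : Int) (h0 : 0 ≤ i) (h1 : i ≤ m) :
    (PySem.List.pyRange 1 (m + 1) 1).take i.toNat = PySem.List.pyRange 1 (i + 1) 1 := by
  rw [PySem.List.pyRange_one, PySem.List.pyRange_one, ← List.map_take, List.take_range]
  have h : min i.toNat (m + 1 - 1).toNat = (i + 1 - 1).toNat := by omega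
  rw [h]

-- one row of the triangle: B's prefix slice of the digits table is exactly A's inner loop
lemma row_eq (number i : Int) (h0 : 0 ≤ i) (h1 : i ≤ number) :
    (PySem.List.slice ((PySem.List.pyRange 1 (number + 1) 1).map PySem.Int.toChars)
        none (some i)).flatten
      = List.flatMap PySem.Int.toChars (PySem.List.pyRange 1 (i + 1) 1) := by
  rw [PySem.List.slice_to _ h0, ← List.map_take, take_pyRange_one number i h0 h1]
  exact List.flatMap_def.symm

theorem draw_triangle_spec : Claim_equal_draw_triangle := by
  intro number _
  unfold Spec_draw_triangle draw_triangle draw_triangle_alt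
  simp only [PySem.List.foldl_append_eq_flatMap, List.append_assoc,
    List.map_append, List.flatten_append, List.map_map, List.nil_append]
  congr 1
  congr 1
  · rw [List.flatMap_def]
    congr 1
    refine List.map_congr_left ?_
    intro i hi
    rw [PySem.List.mem_pyRange_one] at hi
    simp only [Function.comp]
    rw [row_eq number i (by omega) (by omega)]
  · rw [List.flatMap_def]
    congr 1
    refine List.map_congr_left ?_
    intro i hi
    rw [PySem.List.mem_pyRange_neg_one] at hi
    simp only [Function.comp]
    have hrow := row_eq number (i - 1) (by omega) (by omega)
    have hi1 : i - 1 + 1 = i := by omega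
    rw [hi1] at hrow
    rw [hrow]
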